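-- pv_equiv track=rewrite | github.com/nobe0716/problem_solving | codejam/2019/kickstart/h/a.py | solve
-- ===== SOURCE A (Python) =====
-- from collections import Counter
--
-- def solve(n, a):
--     h_indice = []
--     h_index = 0
--     count = 0
--     counter = Counter()
--     for i in range(n):
--         v = a[i]
--         if v <= h_index:
--             h_indice.append(h_index)
--             continue
--
--         counter[v] += 1
--         count += 1
--
--         while h_index + 1 <= count:
--             h_index += 1
--             if counter[h_index] > 0:
--                 count -= counter[h_index]
--         h_indice.append(h_index)
--     return ' '.join(map(str, h_indice))
-- ===== SOURCE B (Python) =====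
-- def solve(n, a):
--     pool = []  # ascending sorted pool of the kept top citations; len(pool) = running h-index
--     res = []
--     for i in range(n):
--         c = a[i]
--         j = 0
--         while j < len(pool) and pool[j] < c:
--             j += 1
--         pool.insert(j, c)
--         if pool[0] < len(pool):
--             pool.pop(0)
--         res.append(len(pool))
--     return ' '.join(map(str, res))
-- ===== Notes on version B (the rewrite author's own statement) =====
-- stated objective: alternative
-- what changed: Replaces A's Counter plus amortized inner while-loop bookkeeping with a sorted pool of the kept top citations: each new citation is inserted in order and the smallest entry is dropped when it falls below the pool size, so the pool size itself is the running h-index that gets appended.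
import Mathlib
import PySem

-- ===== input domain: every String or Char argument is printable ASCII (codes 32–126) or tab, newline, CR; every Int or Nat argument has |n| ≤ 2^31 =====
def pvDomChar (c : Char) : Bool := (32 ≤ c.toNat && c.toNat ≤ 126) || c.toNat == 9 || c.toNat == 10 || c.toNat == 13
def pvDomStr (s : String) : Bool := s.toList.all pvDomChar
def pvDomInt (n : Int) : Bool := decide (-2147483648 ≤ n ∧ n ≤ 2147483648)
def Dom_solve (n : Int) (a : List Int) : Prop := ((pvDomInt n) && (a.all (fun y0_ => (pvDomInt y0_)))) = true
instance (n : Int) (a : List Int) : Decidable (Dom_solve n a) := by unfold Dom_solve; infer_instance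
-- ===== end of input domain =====

-- B replaces A's Counter-plus-amortized-while bookkeeping by a sorted pool of kept papers
-- whose size is the running h-index (alternative algorithm; not claimed faster).

-- ===== PORT A =====
-- the inner 'while h_index + 1 <= count' loop; fuel n.toNat+1 bounds its iterations
-- (h_index increases every iteration and the condition needs h_index + 1 ≤ count ≤ n)
def solveWhile : Nat → Int → Int → PySem.Dict Int Int → Int × Int
  | 0, h, count, _ => (h, count)
  | fuel+1, h, count, counter =>
    if h + 1 ≤ count then
      -- h_index += 1, then 'if counter[h_index] > 0: count -= counter[h_index]' (h' = h + 1 substituted)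
      solveWhile fuel (h + 1)
        (if counter.getD (h + 1) 0 > 0 then count - counter.getD (h + 1) 0 else count) counter
    else (h, count)

-- one iteration of A's 'for i in range(n)' body; state = (h_indice, h_index, count, counter)
def solveStep (a : List Int) (n : Int)
    (st : List Int × Int × Int × PySem.Dict Int Int) (i : Int) :
    List Int × Int × Int × PySem.Dict Int Int :=
  let v := PySem.List.pyGetD a i 0
  if v ≤ st.2.1 then (st.1 ++ [st.2.1], st.2.1, st.2.2.1, st.2.2.2)
  else
    let counter := st.2.2.2.modify v 0 (· + 1)
    let count := st.2.2.1 + 1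
    let p := solveWhile (n.toNat + 1) st.2.1 count counter
    (st.1 ++ [p.1], p.1, p.2, counter)

def solve (n : Int) (a : List Int) : String :=
  let st := (PySem.List.pyRange 0 n 1).foldl (solveStep a n) ([], 0, 0, PySem.Dict.empty)
  PySem.Str.join " " (st.1.map PySem.Int.toStr)

-- ===== PORT B =====
-- Source B's linear scan 'while j < len(pool) and pool[j] < c' followed by pool.insert(j, c),
-- as the structural recursion over the pool
def altInsert (c : Int) : List Int → List Int
  | [] => [c]
  | x :: xs => if x < c then x :: altInsert c xs else c :: x :: xs

-- one iteration of Source B's loop body; state = (res, pool)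
def altStep (a : List Int) (st : List Int × List Int) (i : Int) : List Int × List Int :=
  let c := PySem.List.pyGetD a i 0
  let pool := altInsert c st.2
  let pool := if pool.headD 0 < (pool.length : Int) then pool.tail else pool
  (st.1 ++ [(pool.length : Int)], pool)

def solve_alt (n : Int) (a : List Int) : String :=
  let st := (PySem.List.pyRange 0 n 1).foldl (altStep a) ([], [])
  PySem.Str.join " " (st.1.map PySem.Int.toStr)

-- ===== PRECONDITION & SPEC =====
-- Pre excludes exactly the inputs where A raises IndexError: a[i] with n > len(a)
def Pre_solve (n : Int) (a : List Int) : Prop := n ≤ (a.length : Int)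
instance (n : Int) (a : List Int) : Decidable (Pre_solve n a) := by unfold Pre_solve; infer_instance
def pvWitness_solve : Int × List Int := (3, [1, 5, 2])

def Spec_solve (n : Int) (a : List Int) (out : String) : Prop := out = solve_alt n a
instance (n : Int) (a : List Int) (out : String) : Decidable (Spec_solve n a out) := by unfold Spec_solve; infer_instance

-- ===== CLAIM (what is proved, stated in full; the proofs are below) =====
def Claim_equal_solve : Prop := ∀ (n : Int) (a : List Int), Dom_solve n a → Pre_solve n a → Spec_solve n a (solve n a)

-- ===== LEMMAS AND PROOFS =====

-- the invariant linking A's state (h, count, counter) and B's pool after 'seen' papers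
def PoolInv (seen : List Int) (h count : Int) (counter : PySem.Dict Int Int) (pool : List Int) : Prop :=
  (pool.length : Int) = h ∧
  List.Pairwise (· ≤ ·) pool ∧
  (∀ x ∈ pool, h ≤ x) ∧
  count = ((seen.filter (fun x => decide (h < x))).length : Int) ∧
  count ≤ h ∧
  (∀ k : Int, h < k → counter.getD k 0 = (seen.count k : Int)) ∧
  (∀ k : Int, h < k → (pool.count k : Int) = (seen.count k : Int))

lemma altInsert_perm (c : Int) (l : List Int) : (altInsert c l).Perm (c :: l) := by
  induction l with
  | nil => simp [altInsert]
  | cons x xs ih =>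
    by_cases hx : x < c
    · simpa [altInsert, hx] using ((ih.cons x).trans (List.Perm.swap c x xs))
    · simp [altInsert, hx]

lemma altInsert_length (c : Int) (l : List Int) : (altInsert c l).length = l.length + 1 := by
  simpa using (altInsert_perm c l).length_eq

lemma altInsert_count (c k : Int) (l : List Int) :
    (altInsert c l).count k = l.count k + (if c = k then 1 else 0) := by
  have h := (altInsert_perm c l).count_eq k
  simp only [List.count_cons, beq_iff_eq] at h
  by_cases hck : c = k <;> simp [hck] at h ⊢ <;> omega

lemma altInsert_mem {c x : Int} {l : List Int} (hx : x ∈ altInsert c l) : x = c ∨ x ∈ l := by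
  have := (altInsert_perm c l).mem_iff.mp hx
  simpa using this

lemma altInsert_sorted {c : Int} {l : List Int} (hl : List.Pairwise (· ≤ ·) l) :
    List.Pairwise (· ≤ ·) (altInsert c l) := by
  induction l with
  | nil => simp [altInsert]
  | cons x xs ih =>
    rw [List.pairwise_cons] at hl
    by_cases hx : x < c
    · rw [altInsert, if_pos hx, List.pairwise_cons]
      refine ⟨?_, ih hl.2⟩
      intro b hb
      rcases altInsert_mem hb with rfl | hb'
      · exact le_of_lt hx
      · exact hl.1 b hb'
    · rw [altInsert, if_neg hx, List.pairwise_cons]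
      refine ⟨?_, List.pairwise_cons.mpr hl⟩
      intro b hb
      rcases List.mem_cons.mp hb with rfl | hb'
      · omega
      · exact le_trans (by omega) (hl.1 b hb')

-- equal counts above h give equal (> h)-filter lengths
lemma filt_len {L seen : List Int} {h : Int}
    (hc : ∀ k : Int, h < k → L.count k = seen.count k) :
    (L.filter (fun x => decide (h < x))).length = (seen.filter (fun x => decide (h < x))).length := by
  have hperm : (L.filter (fun x => decide (h < x))).Perm (seen.filter (fun x => decide (h < x))) := by
    rw [List.perm_iff_count]
    intro k
    by_cases hk : h < k
    · rw [List.count_filter (by simpa using hk), List.count_filter (by simpa using hk), hc k hk]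
    · have e0 : ∀ l : List Int, (l.filter (fun x => decide (h < x))).count k = 0 := by
        intro l
        refine List.count_eq_zero.mpr (fun hm => hk ?_)
        simpa using (List.mem_filter.mp hm).2
      rw [e0, e0]
  exact hperm.length_eq

-- #{x > h} = #{x > h+1} + #{x = h+1}
lemma filt_split (xs : List Int) (h : Int) :
    (xs.filter (fun x => decide (h < x))).length =
      (xs.filter (fun x => decide (h + 1 < x))).length + xs.count (h + 1) := by
  induction xs with
  | nil => simp
  | cons x xs ih =>
    simp only [List.filter_cons, List.count_cons, beq_iff_eq]
    split_ifs with h1 h2 h3 <;> simp_all <;> omega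

-- abstract one-step forms of the two loop bodies (on the already-fetched value v)
def stepACore (fuel : Nat) (v h count : Int) (counter : PySem.Dict Int Int) :
    Int × Int × PySem.Dict Int Int :=
  if v ≤ h then (h, count, counter)
  else
    let counter' := counter.modify v 0 (· + 1)
    let p := solveWhile fuel h (count + 1) counter'
    (p.1, p.2, counter')

def stepBCore (v : Int) (pool : List Int) : List Int :=
  let p1 := altInsert v pool
  if p1.headD 0 < (p1.length : Int) then p1.tail else p1

-- the main simulation step: both bodies preserve the invariant and stay in lock-step
lemma step_both (fuel : Nat) (hf : 2 ≤ fuel) (v : Int)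
    (seen : List Int) (h count : Int) (counter : PySem.Dict Int Int) (pool : List Int)
    (hI : PoolInv seen h count counter pool) :
    PoolInv (seen ++ [v]) (stepACore fuel v h count counter).1
      (stepACore fuel v h count counter).2.1 (stepACore fuel v h count counter).2.2
      (stepBCore v pool) := by
  obtain ⟨hlen, hsort, hge, hcnt, hch, hctr, hpc⟩ := hI
  have h0 : 0 ≤ h := by
    have : (0 : Int) ≤ (pool.length : Int) := by positivity
    omega
  have hcount0 : 0 ≤ count := by
    have : (0 : Int) ≤ ((seen.filter (fun x => decide (h < x))).length : Int) := by positivity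
    omega
  by_cases hv : v ≤ h
  · -- v ≤ h_index: A does nothing; B inserts v at the front and pops it again
    have hins : altInsert v pool = v :: pool := by
      cases pool with
      | nil => simp [altInsert]
      | cons x xs =>
        have : ¬ x < v := by have := hge x (by simp); omega
        simp [altInsert, this]
    have hB : stepBCore v pool = pool := by
      simp only [stepBCore, hins]
      rw [if_pos (by simp only [List.headD_cons, List.length_cons]; push_cast; omega)]
      simp
    rw [hB]
    simp only [stepACore, if_pos hv]
    refine ⟨hlen, hsort, hge, ?_, hch, ?_, ?_⟩
    · rw [List.filter_append]
      simp only [List.filter_cons, List.filter_nil]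
      rw [if_neg (by simpa using (by omega : ¬ h < v))]
      simpa using hcnt
    · intro k hk
      rw [List.count_append]
      have : [v].count k = 0 := by
        simp [List.count_singleton]
        omega
      rw [this]
      simpa using hctr k hk
    · intro k hk
      rw [List.count_append]
      have : [v].count k = 0 := by
        simp [List.count_singleton]
        omega
      rw [this]
      simpa using hpc k hk
  · -- v > h_index
    push_neg at hv
    set counter' := counter.modify v 0 (· + 1) with hc'
    have hctr' : ∀ k : Int, h < k → counter'.getD k 0 = ((seen ++ [v]).count k : Int) := by
      intro k hk
      rw [hc', PySem.Dict.getD_modify, List.count_append]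
      by_cases hkv : k = v
      · subst hkv
        rw [if_pos rfl, hctr k hk]
        simp [List.count_singleton]
      · rw [if_neg hkv]
        have : [v].count k = 0 := by simp [List.count_singleton]; omega
        rw [this, hctr k hk]
        simp
    have hcnt' : ((seen ++ [v]).filter (fun x => decide (h < x))).length
        = (seen.filter (fun x => decide (h < x))).length + 1 := by
      rw [List.filter_append]
      simp [hv]
    obtain ⟨f, rfl⟩ : ∃ f, fuel = f + 2 := ⟨fuel - 2, by omega⟩
    by_cases hcase : count = h
    · -- while loop runs exactly once: h_index becomes h+1, B's pool keeps all h+1 papers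
      have hallgt : ∀ x ∈ pool, h + 1 ≤ x := by
        have hfl : (pool.filter (fun x => decide (h < x))).length
            = (seen.filter (fun x => decide (h < x))).length :=
          filt_len (fun k hk => by have := hpc k hk; omega)
        have : (pool.filter (fun x => decide (h < x))).length = pool.length := by
          have : ((pool.filter (fun x => decide (h < x))).length : Int) = (pool.length : Int) := by
            rw [hfl]; omega
          omega
        have hall := (List.length_filter_eq_length_iff).mp this
        intro x hx
        have := hall x hx
        simp at this
        omega
      have hins : ∀ x ∈ altInsert v pool, h + 1 ≤ x := by
        intro x hx
        rcases altInsert_mem hx with rfl | hx'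
        · omega
        · exact hallgt x hx'
      have hne : altInsert v pool ≠ [] := by
        have := altInsert_length v pool
        intro hcon
        rw [hcon] at this
        simp at this
      have hB : stepBCore v pool = altInsert v pool := by
        simp only [stepBCore]
        rw [if_neg]
        push_neg
        have hh : (altInsert v pool).headD 0 ∈ altInsert v pool := by
          cases hq : altInsert v pool with
          | nil => exact absurd hq hne
          | cons y ys => simp
        have := hins _ hh
        rw [altInsert_length]
        push_cast
        omega
      have hA : stepACore (f + 2) v h count counter
          = (h + 1, count + 1 - counter'.getD (h + 1) 0, counter') := by
        simp only [stepACore, if_neg (by omega : ¬ v ≤ h), ← hc']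
        have hc1 : counter'.getD (h + 1) 0 = ((seen ++ [v]).count (h + 1) : Int) :=
          hctr' (h + 1) (by omega)
        have hcnn : 0 ≤ counter'.getD (h + 1) 0 := by rw [hc1]; positivity
        show (_, _, _) = (_, _, _)
        rw [solveWhile, if_pos (by omega : h + 1 ≤ count + 1)]
        by_cases hz : counter'.getD (h + 1) 0 > 0
        · rw [if_pos hz, solveWhile, if_neg (by omega)]
        · rw [if_neg hz, solveWhile, if_neg (by omega)]
          have hz0 : counter'.getD (h + 1) 0 = 0 := by omega
          rw [hz0]
          simp
      rw [hA, hB]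
      dsimp only
      have hc1 : counter'.getD (h + 1) 0 = ((seen ++ [v]).count (h + 1) : Int) :=
        hctr' (h + 1) (by omega)
      refine ⟨?_, altInsert_sorted hsort, hins, ?_, ?_, ?_, ?_⟩
      · rw [altInsert_length]; push_cast; omega
      · -- count' = #{x ∈ seen' : x > h+1}
        have hsplit := filt_split (seen ++ [v]) h
        rw [hc1]
        push_cast
        omega
      · have : (0 : Int) ≤ (((seen ++ [v]).filter (fun x => decide (h + 1 < x))).length : Int) := by
          positivity
        have hsplit := filt_split (seen ++ [v]) h
        rw [hc1]
        push_cast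
        omega
      · intro k hk
        exact hctr' k (by omega)
      · intro k hk
        rw [altInsert_count, List.count_append]
        have := hpc k (by omega)
        push_cast
        by_cases hkv : v = k
        · subst hkv
          simp [List.count_singleton]
          omega
        · have : [v].count k = 0 := by simp [List.count_singleton]; omega
          rw [this]
          simp only [if_neg hkv]
          omega
    · -- count < h: h_index stays; B pops the minimum, which equals h
      have hcl : count < h := by omega
      have hA : stepACore (f + 2) v h count counter = (h, count + 1, counter') := by
        simp only [stepACore, if_neg (by omega : ¬ v ≤ h), ← hc']
        show (_, _, _) = (_, _, _)
        rw [solveWhile, if_neg (by omega)]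
      -- pool has an element ≤ h (all are ≥ h, so = h), hence head pool = h
      obtain ⟨x0, xs0, hpool⟩ : ∃ x0 xs0, pool = x0 :: xs0 := by
        cases pool with
        | nil => simp at hlen; omega
        | cons y ys => exact ⟨y, ys, rfl⟩
      have hx0 : x0 = h := by
        by_contra hne
        have hx0ge : h ≤ x0 := hge x0 (by simp [hpool])
        have hx0gt : h < x0 := by omega
        have hallgt : ∀ x ∈ pool, h < x := by
          rw [hpool]
          rw [hpool, List.pairwise_cons] at hsort
          intro x hx
          rcases List.mem_cons.mp hx with rfl | hx'
          · exact hx0gt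
          · have := hsort.1 x hx'
            omega
        have : (pool.filter (fun x => decide (h < x))).length = pool.length := by
          rw [List.length_filter_eq_length_iff]
          intro x hx
          simp [hallgt x hx]
        have hfl : (pool.filter (fun x => decide (h < x))).length
            = (seen.filter (fun x => decide (h < x))).length :=
          filt_len (fun k hk => by have := hpc k hk; omega)
        omega
      have hx0v : x0 < v := by omega
      have hins : altInsert v pool = x0 :: altInsert v xs0 := by
        rw [hpool, altInsert, if_pos hx0v]
      have hB : stepBCore v pool = altInsert v xs0 := by
        simp only [stepBCore, hins]
        rw [if_pos]
        · simp
        · simp only [List.headD_cons, List.length_cons, altInsert_length]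
          have hlen' : (xs0.length : Int) = h - 1 := by
            rw [hpool] at hlen
            simp only [List.length_cons] at hlen
            push_cast at hlen ⊢
            omega
          push_cast
          omega
      rw [hA, hB]
      dsimp only
      have hsort' : List.Pairwise (· ≤ ·) xs0 := by
        rw [hpool, List.pairwise_cons] at hsort
        exact hsort.2
      refine ⟨?_, altInsert_sorted hsort', ?_, ?_, by omega, hctr', ?_⟩
      · rw [altInsert_length]
        rw [hpool] at hlen
        simp only [List.length_cons] at hlen
        push_cast at hlen ⊢
        omega
      · intro x hx
        rcases altInsert_mem hx with rfl | hx'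
        · omega
        · exact hge x (by simp [hpool, hx'])
      · rw [hcnt']
        push_cast
        omega
      · intro k hk
        rw [altInsert_count, List.count_append]
        have hpck := hpc k hk
        rw [hpool, List.count_cons] at hpck
        have hx0k : ¬ (x0 = k) := by omega
        simp only [beq_iff_eq, if_neg hx0k] at hpck
        push_cast at hpck ⊢
        by_cases hkv : v = k
        · subst hkv
          simp [List.count_singleton]
          omega
        · have : [v].count k = 0 := by simp [List.count_singleton]; omega
          rw [this]
          simp only [if_neg hkv]
          omega

-- the loop bodies reduce to the abstract cores
lemma solveStep_eq (a : List Int) (n : Int) (hs : List Int) (h count : Int)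
    (counter : PySem.Dict Int Int) (i : Int) :
    solveStep a n (hs, h, count, counter) i =
      (hs ++ [(stepACore (n.toNat + 1) (PySem.List.pyGetD a i 0) h count counter).1],
       stepACore (n.toNat + 1) (PySem.List.pyGetD a i 0) h count counter) := by
  simp only [solveStep, stepACore]
  by_cases hv : PySem.List.pyGetD a i 0 ≤ h
  · simp [hv]
  · simp [hv]

lemma altStep_eq (a : List Int) (hs pool : List Int) (i : Int) :
    altStep a (hs, pool) i =
      (hs ++ [((stepBCore (PySem.List.pyGetD a i 0) pool).length : Int)],
       stepBCore (PySem.List.pyGetD a i 0) pool) := by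
  simp only [altStep, stepBCore]

-- main loop invariant: after i steps the two folds produce the same h_indice list
lemma loop_inv (a : List Int) (n : Int) (hpre : n ≤ (a.length : Int)) (hn : 0 < n) :
    ∀ i : Nat, (i : Int) ≤ n →
    ∃ hs h count counter pool,
      (PySem.List.pyRange 0 i 1).foldl (solveStep a n) ([], 0, 0, PySem.Dict.empty)
        = (hs, h, count, counter) ∧
      (PySem.List.pyRange 0 i 1).foldl (altStep a) ([], []) = (hs, pool) ∧
      PoolInv (a.take i) h count counter pool := by
  intro i
  induction i with
  | zero =>
    intro _
    have hemp : PySem.List.pyRange 0 ((0 : Nat) : Int) 1 = [] :=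
      PySem.List.pyRange_one_eq_nil (by norm_num)
    refine ⟨[], 0, 0, PySem.Dict.empty, [], ?_, ?_, ?_⟩
    · rw [hemp, List.foldl_nil]
    · rw [hemp, List.foldl_nil]
    · unfold PoolInv
      refine ⟨by simp, by simp, by simp, by simp, by omega, ?_, ?_⟩
      · intro k hk
        simp [PySem.Dict.getD_empty]
      · intro k hk
        simp
  | succ i ih =>
    intro hi1
    have hi : (i : Int) ≤ n := by push_cast at hi1 ⊢; omega
    obtain ⟨hs, h, count, counter, pool, hA, hB, hI⟩ := ih hi
    have hrange : PySem.List.pyRange 0 ((i : Nat) + 1 : Nat) 1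
        = PySem.List.pyRange 0 i 1 ++ [(i : Int)] := by
      have := PySem.List.pyRange_one_succ_right (a := 0) (b := (i : Int)) (by positivity)
      push_cast
      rw [← this]
    have hilen : i < a.length := by push_cast at hi1 hpre; omega
    have hfuel : 2 ≤ n.toNat + 1 := by omega
    have hstep := step_both (n.toNat + 1) hfuel (PySem.List.pyGetD a (i : Int) 0)
      (a.take i) h count counter pool hI
    have htake : a.take (i + 1) = a.take i ++ [PySem.List.pyGetD a (i : Int) 0] := by
      rw [PySem.List.pyGetD_natCast, List.getD_eq_getElem?_getD,
        List.getElem?_eq_getElem hilen, List.take_add_one, List.getElem?_eq_getElem hilen]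
      rfl
    refine ⟨hs ++ [(stepACore (n.toNat + 1) (PySem.List.pyGetD a (i : Int) 0) h count counter).1],
      (stepACore (n.toNat + 1) (PySem.List.pyGetD a (i : Int) 0) h count counter).1,
      (stepACore (n.toNat + 1) (PySem.List.pyGetD a (i : Int) 0) h count counter).2.1,
      (stepACore (n.toNat + 1) (PySem.List.pyGetD a (i : Int) 0) h count counter).2.2,
      stepBCore (PySem.List.pyGetD a (i : Int) 0) pool, ?_, ?_, ?_⟩
    · rw [hrange, List.foldl_append, hA]
      simp [solveStep_eq]
    · rw [hrange, List.foldl_append, hB]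
      rw [List.foldl_cons, List.foldl_nil, altStep_eq]
      have hl : ((stepBCore (PySem.List.pyGetD a (i : Int) 0) pool).length : Int)
          = (stepACore (n.toNat + 1) (PySem.List.pyGetD a (i : Int) 0) h count counter).1 :=
        hstep.1
      rw [hl]
    · rw [htake]
      exact hstep

-- ===== VERDICT (by name: the statement is the Claim_ definition above) =====
theorem solve_spec : Claim_equal_solve := by
  unfold Claim_equal_solve
  intro n a _ hpre
  unfold Spec_solve
  by_cases hn : 0 < n
  · obtain ⟨hs, h, count, counter, pool, hA, hB, _⟩ :=
      loop_inv a n hpre hn n.toNat (by omega)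
    have hcast : ((n.toNat : Nat) : Int) = n := by omega
    rw [hcast] at hA hB
    simp only [solve, solve_alt, hA, hB]
  · have hemp : PySem.List.pyRange 0 n 1 = [] := PySem.List.pyRange_one_eq_nil (by omega)
    simp only [solve, solve_alt, hemp, List.foldl_nil]
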